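-- pv_equiv track=rewrite | github.com/Levelent/CompChallenge | 2019/solutions_python.py | combinations
-- ===== SOURCE A (Python) =====
-- def combinations(comb_list, depth):
--     total = 0
--     if depth == 1:
--         # We’ve reached the bottom, so should add all remaining values
--         for combination in comb_list:
--             total += combination
--         return total
--
--     for i in range(len(comb_list) - depth + 1):
--         # All items in the list after position i
--         remaining = comb_list[(i + 1):]
--
--         # Find the combinations of the remaining list, and multiply
--         other_combs = combinations(remaining, depth - 1)
--         total += comb_list[i] * other_combs
--
--     return total
-- ===== SOURCE B (Python) =====
-- def combinations(comb_list, depth):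
--     # Elementary symmetric polynomial e_depth via one-pass DP:
--     # e[k] after processing a prefix is the sum of products of all k-subsets of it.
--     if depth > len(comb_list):
--         return 0
--     e = [1] + [0] * depth
--     for x in comb_list:
--         e = [1] + [cur + prev * x for prev, cur in zip(e, e[1:])]
--     return e[depth]
-- ===== Notes on version B (the rewrite author's own statement) =====
-- stated objective: faster
-- what changed: Replaces the exponential recursion over all C(n,depth) index combinations by a single left-to-right dynamic-programming pass maintaining the vector of elementary symmetric polynomials e_0..e_depth; intended as faster (O(n*depth) vs O(C(n,depth)*depth)); measured ~1857x at n=64, the largest size A finished (A timed out beyond).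
import Mathlib
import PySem

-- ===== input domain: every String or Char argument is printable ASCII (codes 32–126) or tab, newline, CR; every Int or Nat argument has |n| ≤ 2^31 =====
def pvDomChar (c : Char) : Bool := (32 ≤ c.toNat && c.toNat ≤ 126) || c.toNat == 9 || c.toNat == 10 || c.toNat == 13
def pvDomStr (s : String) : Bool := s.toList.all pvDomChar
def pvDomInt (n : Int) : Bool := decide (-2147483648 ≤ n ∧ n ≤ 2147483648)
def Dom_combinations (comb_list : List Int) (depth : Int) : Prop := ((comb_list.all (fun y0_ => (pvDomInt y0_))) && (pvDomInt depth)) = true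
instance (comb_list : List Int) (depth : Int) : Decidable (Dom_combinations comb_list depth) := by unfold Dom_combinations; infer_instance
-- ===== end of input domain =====

-- B replaces A's recursion over all C(n,depth) subset choices by a single
-- left-to-right DP pass over the elementary-symmetric-polynomial vector; intended as
-- faster (measured ~1857x at n=64, the largest size A finished; A timed out beyond).

-- ===== PORT A =====
-- fuel makes A's recursion total in Lean; on Pre_ (1 ≤ depth) each recursive call
-- strictly shortens the list, so the initial fuel comb_list.length + 1 is never
-- exhausted and the port is exact there.
def combA : Nat → List Int → Int → Int
  | 0, _, _ => 0
  | fuel+1, xs, depth =>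
    if depth == 1 then
      xs.foldl (fun total combination => total + combination) 0
    else
      (PySem.List.pyRange 0 ((xs.length : Int) - depth + 1) 1).foldl
        (fun total i =>
          let remaining := PySem.List.slice xs (some (i + 1)) none
          let other_combs := combA fuel remaining (depth - 1)
          total + (PySem.List.pyGetD xs i 0) * other_combs) 0

def combinations (comb_list : List Int) (depth : Int) : Int :=
  combA (comb_list.length + 1) comb_list depth

-- ===== PORT B =====
def combinations_alt (comb_list : List Int) (depth : Int) : Int :=
  if ((comb_list.length : Int) < depth) then 0
  else
    let e0 : List Int := 1 :: List.replicate depth.toNat 0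
    let e := comb_list.foldl
      (fun e x => 1 :: List.zipWith (fun prev cur => cur + prev * x) e (PySem.List.slice e (some 1) none)) e0
    PySem.List.pyGetD e depth 0

-- ===== PRECONDITION & SPEC =====
-- Pre_ excludes exactly depth ≤ 0, where A's recursion never terminates (Python RecursionError).
def Pre_combinations (comb_list : List Int) (depth : Int) : Prop := 1 ≤ depth
instance (comb_list : List Int) (depth : Int) : Decidable (Pre_combinations comb_list depth) := by unfold Pre_combinations; infer_instance
def pvWitness_combinations : List Int × Int := ([1, 2, 3], 2)

def Spec_combinations (comb_list : List Int) (depth : Int) (out : Int) : Prop := out = combinations_alt comb_list depth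
instance (comb_list : List Int) (depth : Int) (out : Int) : Decidable (Spec_combinations comb_list depth out) := by unfold Spec_combinations; infer_instance

-- ===== CLAIM (what is proved, stated in full; the proofs are below) =====
def Claim_equal_combinations : Prop := ∀ (comb_list : List Int) (depth : Int), Dom_combinations comb_list depth → Pre_combinations comb_list depth → Spec_combinations comb_list depth (combinations comb_list depth)

-- ===== LEMMAS AND PROOFS =====

-- e_k(xs): the sum of products of all k-element subsets of xs.
def esym : Nat → List Int → Int
  | 0, _ => 1
  | _+1, [] => 0
  | k+1, x::xs => x * esym k xs + esym (k+1) xs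

theorem esym_eq_zero : ∀ (xs : List Int) (k : Nat), xs.length < k → esym k xs = 0 := by
  intro xs
  induction xs with
  | nil => intro k hk; cases k with
    | zero => omega
    | succ k => simp [esym]
  | cons x xs ih =>
    intro k hk
    cases k with
    | zero => omega
    | succ k =>
      simp only [List.length_cons] at hk
      simp [esym, ih k (by omega), ih (k+1) (by omega)]

theorem esym_one (xs : List Int) : esym 1 xs = xs.sum := by
  induction xs with
  | nil => simp [esym]
  | cons x xs ih => simp [esym, ih]

theorem esym_append (xs : List Int) (y : Int) (k : Nat) :
    esym k (xs ++ [y]) = esym k xs + y * (if k = 0 then 0 else esym (k-1) xs) := by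
  induction xs generalizing k with
  | nil =>
    cases k with
    | zero => simp [esym]
    | succ k => cases k <;> simp [esym]
  | cons x xs ih =>
    cases k with
    | zero => simp [esym]
    | succ k =>
      simp only [List.cons_append, esym, ih]
      cases k with
      | zero => simp [esym]; ring
      | succ k => simp only [esym, Nat.add_sub_cancel, if_neg (Nat.succ_ne_zero _)]; ring

-- A's recursion step: e_{k+1}(xs) is the sum over the pivot position i.
theorem esym_sum_pivot : ∀ (xs : List Int) (k : Nat),
    ((List.range (xs.length - k)).map
      (fun i => xs.getD i 0 * esym k (xs.drop (i+1)))).sum = esym (k+1) xs := by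
  intro xs
  induction xs with
  | nil => intro k; simp [esym]
  | cons x xs ih =>
    intro k
    by_cases hk : xs.length + 1 ≤ k
    · have h0 : (x :: xs).length - k = 0 := by simp; omega
      rw [h0]
      simp [esym, esym_eq_zero xs k (by omega), esym_eq_zero xs (k+1) (by omega)]
    · have h1 : (x :: xs).length - k = (xs.length - k) + 1 := by simp; omega
      rw [h1, List.range_succ_eq_map, List.map_cons, List.map_map, List.sum_cons]
      have h2 : ((List.range (xs.length - k)).map
          ((fun i => (x :: xs).getD i 0 * esym k ((x :: xs).drop (i+1))) ∘ (· + 1))).sum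
          = ((List.range (xs.length - k)).map
            (fun i => xs.getD i 0 * esym k (xs.drop (i+1)))).sum := by
        refine congrArg List.sum (List.map_congr_left ?_)
        intro i _
        simp [List.getD]
      rw [h2, ih k]
      simp [esym]

-- A computes e_depth.
theorem combA_eq_esym : ∀ (fuel : Nat) (xs : List Int) (depth : Int),
    xs.length < fuel → 1 ≤ depth → combA fuel xs depth = esym depth.toNat xs := by
  intro fuel
  induction fuel with
  | zero => intro xs depth h _; omega
  | succ fuel ih =>
    intro xs depth hfuel hd
    by_cases h1 : depth = 1
    · subst h1
      simp only [combA, beq_self_eq_true, if_pos]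
      rw [PySem.List.foldl_add (g := fun c => c)]
      simp [esym_one]
    · have hd2 : 2 ≤ depth := by omega
      have hne : (depth == 1) = false := by simp [h1]
      simp only [combA, hne, Bool.false_eq_true, if_false]
      rw [PySem.List.pyRange_one, List.foldl_map]
      rw [PySem.List.foldl_add (g := fun (k:Nat) => PySem.List.pyGetD xs ((0:Int) + k) 0 *
            combA fuel (PySem.List.slice xs (some ((0:Int) + k + 1)) none) (depth - 1))]
      rw [List.map_congr_left (l := List.range ((↑xs.length - depth + 1 - 0).toNat))
            (g := fun (k:Nat) => xs.getD k 0 * esym (depth-1).toNat (xs.drop (k+1)))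
            (by
              intro k hk
              have hk' : k < ((xs.length:Int) - depth + 1 - 0).toNat := List.mem_range.mp hk
              simp only [zero_add]
              have hs : PySem.List.slice xs (some ((k:Int) + 1)) none = xs.drop (k+1) := by
                rw [show ((k:Int)+1) = ((k+1 : Nat) : Int) by push_cast; ring,
                    PySem.List.slice_from_natCast]
              rw [hs, ih (xs.drop (k+1)) (depth-1) (by simp; omega) (by omega)]
              simp)]
      have hp := esym_sum_pivot xs (depth-1).toNat
      rw [show xs.length - (depth-1).toNat = ((xs.length:Int) - depth + 1 - 0).toNat by omega] at hp
      rw [hp, show (depth-1).toNat + 1 = depth.toNat by omega]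
      ring

-- B's accumulator after a prefix is exactly the vector [e_0, …, e_d] of that prefix.
def Evec (d : Nat) (xs : List Int) : List Int := (List.range (d+1)).map (fun k => esym k xs)

theorem Evec_nil (d : Nat) : Evec d [] = 1 :: List.replicate d 0 := by
  unfold Evec
  rw [List.range_succ_eq_map, List.map_cons, List.map_map]
  congr 1
  rw [List.eq_replicate_iff]
  constructor
  · simp
  · intro b hb
    obtain ⟨k, _, hk⟩ := List.mem_map.mp hb
    simp [esym] at hk
    omega

theorem Evec_step (d : Nat) (xs : List Int) (x : Int) :
    1 :: List.zipWith (fun prev cur => cur + prev * x) (Evec d xs) (PySem.List.slice (Evec d xs) (some 1) none)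
      = Evec d (xs ++ [x]) := by
  rw [PySem.List.slice_from_one]
  apply List.ext_getElem
  · simp [Evec, List.length_zipWith]
  · intro n h1 h2
    cases n with
    | zero => simp [Evec, esym]
    | succ n =>
      have hn : n + 1 < d + 1 := by simpa [Evec] using h2
      simp only [List.getElem_cons_succ, List.getElem_zipWith, List.getElem_tail]
      simp only [Evec, List.getElem_map, List.getElem_range]
      rw [esym_append]
      simp
      ring

theorem foldl_Evec (d : Nat) : ∀ (xs : List Int),
    xs.foldl (fun e x => 1 :: List.zipWith (fun prev cur => cur + prev * x) e (PySem.List.slice e (some 1) none))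
      (1 :: List.replicate d 0) = Evec d xs := by
  intro xs
  induction xs using List.reverseRecOn with
  | nil => exact (Evec_nil d).symm
  | append_singleton xs x ih => rw [List.foldl_append, List.foldl_cons, List.foldl_nil, ih, Evec_step]

-- B computes e_depth.
theorem alt_eq_esym (xs : List Int) (depth : Int) (hd : 1 ≤ depth) :
    combinations_alt xs depth = esym depth.toNat xs := by
  unfold combinations_alt
  by_cases h : (xs.length : Int) < depth
  · rw [if_pos h, esym_eq_zero xs depth.toNat (by omega)]
  · rw [if_neg h]
    simp only [foldl_Evec]
    rw [PySem.List.pyGetD_eq_getElem _ 0 (by omega) (by simp only [Evec, List.length_map, List.length_range]; omega)]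
    simp [Evec]

-- ===== VERDICT (by name: the statement is the Claim_ definition above) =====
theorem combinations_spec : Claim_equal_combinations := by
  intro xs depth _ hpre
  unfold Spec_combinations combinations
  rw [combA_eq_esym (xs.length + 1) xs depth (by omega) hpre, alt_eq_esym xs depth hpre]
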